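-- pv_equiv track=rewrite | github.com/Byronitus/WTC | submission_003-robot-5-master/maze/sphesmaze.py | is_path_blocked
-- ===== SOURCE A (Python) =====
-- ob_list = [
--         (-85, 175), (-30, 175), (30, 175) , (80, 175),
--         (-56, 150), (0, 150),(56, 150),
--         (-85, 120), (-30, 120), (30, 120), (80, 120),
--         (-56, 95), (0, 95), (56, 95),
--         (-85, 70), (-30, 70), (30, 70), (80, 70),
--         (-56, 45), (0, 45), (56, 45),
--         (-85, 20), (-30, 20), (30, 20), (80, 20),
--         (-56, 0), (-30,0),(30, 0),
--         (-85, -25), (-30,-25), (30, -25),(80, -25),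
--         (-56, -60), (0, -60), (56,-60),
--         (-85, -95), (-30, -95), (30, -95), (80, -95),
--         (-56, -120), (0, -120), (-56, -120),
--         (-85, -145), (-30, -145), (30, -145), (80, -145),
--         (-56, -175), (0, -175), (56, -175),
--         (-85, -185), (-30, -185), (30, -185), (80, -185)
--     ]
--
-- def is_position_blocked(x,y):
--     """Checks if current position is in any of the obstacles"""
--     for j in ob_list:
--         x_check = False
--         y_check = False
--         if x >= j[0] and x <= (j[0] + 4):
--             x_check = True
--         if y >= j[1] and y <= (j[1] + 4):
--             y_check = True
--         if x_check and y_check: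
--             return True
--     return False
--
-- def smaller_bigger(one,two):
--     """Returns the smaller value first"""
--     if one > two:
--         return two , one
--     if two > one:
--         return one , two
--
-- def is_path_blocked(x1,y1, x2, y2):
--     """Checks if there is an obstacle in the path"""
--     diff_list = []
--     nums_x = smaller_bigger(x1 , x2)
--     nums_y = smaller_bigger(y1 , y2)
--     x_check = False
--     if not x1 == x2:
--         diff = range(nums_x[0],nums_x[1],4)
--         for q in diff:
--             diff_list.append(q)
--         diff_list.append(nums_x[1])
--         x_check = True
--     elif not y1 == y2:
--         diff = range(nums_y[0],nums_y[1],4)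
--         for q in diff:
--             diff_list.append(q)
--         diff_list.append(nums_y[1])
--     else:
--         return False
--     for z in diff_list:
--         if x_check:
--             if is_position_blocked(z,y1):
--                 return True
--         else:
--             if is_position_blocked(x1,z):
--                 return True
--     return False
-- ===== SOURCE B (Python) =====
-- ob_list = [
--         (-85, 175), (-30, 175), (30, 175) , (80, 175),
--         (-56, 150), (0, 150),(56, 150),
--         (-85, 120), (-30, 120), (30, 120), (80, 120),
--         (-56, 95), (0, 95), (56, 95),
--         (-85, 70), (-30, 70), (30, 70), (80, 70),
--         (-56, 45), (0, 45), (56, 45),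
--         (-85, 20), (-30, 20), (30, 20), (80, 20),
--         (-56, 0), (-30,0),(30, 0),
--         (-85, -25), (-30,-25), (30, -25),(80, -25),
--         (-56, -60), (0, -60), (56,-60),
--         (-85, -95), (-30, -95), (30, -95), (80, -95),
--         (-56, -120), (0, -120), (-56, -120),
--         (-85, -145), (-30, -145), (30, -145), (80, -145),
--         (-56, -175), (0, -175), (56, -175),
--         (-85, -185), (-30, -185), (30, -185), (80, -185)
--     ]
--
--
-- def _box_blocks(lo, hi, fixed, fa, fb):
--     """O(1) test: does the sampled walk lo, lo+4, ... (<hi) plus the endpoint hi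
--     hit the box whose moving-axis interval is [fb, fb+4], with the fixed
--     coordinate inside [fa, fa+4]?"""
--     return (fa <= fixed <= fa + 4) and (
--         (fb <= hi <= fb + 4)
--         or lo + 4 * max(0, -((lo - fb) // 4)) <= min(fb + 4, hi - 1)
--     )
--
--
-- def is_path_blocked(x1, y1, x2, y2):
--     """Checks if there is an obstacle in the path (O(#obstacles), independent of distance)"""
--     if x1 != x2:
--         lo, hi = (x1, x2) if x1 < x2 else (x2, x1)
--         return any(_box_blocks(lo, hi, y1, b, a) for (a, b) in ob_list)
--     if y1 != y2:
--         lo, hi = (y1, y2) if y1 < y2 else (y2, y1)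
--         return any(_box_blocks(lo, hi, x1, a, b) for (a, b) in ob_list)
--     return False
-- ===== Notes on version B (the rewrite author's own statement) =====
-- stated objective: faster
-- what changed: Instead of materialising the list of every 4th coordinate along the path and testing each sample against all 52 obstacle boxes, B loops once over the fixed obstacle list and decides with O(1) floor-division arithmetic whether the sampled walk (lo, lo+4, ..., plus the endpoint) intersects each box's interval.
import Mathlib
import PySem

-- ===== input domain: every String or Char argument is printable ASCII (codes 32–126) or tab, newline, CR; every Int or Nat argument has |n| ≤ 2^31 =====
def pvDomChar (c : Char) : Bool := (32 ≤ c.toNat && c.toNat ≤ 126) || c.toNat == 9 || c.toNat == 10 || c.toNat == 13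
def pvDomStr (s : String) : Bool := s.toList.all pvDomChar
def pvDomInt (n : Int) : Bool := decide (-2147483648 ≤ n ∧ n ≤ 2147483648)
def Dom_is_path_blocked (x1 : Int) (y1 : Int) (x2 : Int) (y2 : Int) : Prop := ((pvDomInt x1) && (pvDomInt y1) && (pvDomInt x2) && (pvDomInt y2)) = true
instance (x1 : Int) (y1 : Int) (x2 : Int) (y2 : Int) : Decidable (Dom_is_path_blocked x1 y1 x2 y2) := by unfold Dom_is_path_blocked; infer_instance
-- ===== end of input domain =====

-- B replaces A's walk along every 4th coordinate of the path by an O(1) modular test per obstacle box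
-- (objective: faster — per-box arithmetic instead of a scan whose length grows with the path length).


-- shared module constant ob_list (identical literal in Source A and Source B)
def obList : List (Int × Int) := [
        (-85, 175), (-30, 175), (30, 175), (80, 175),
        (-56, 150), (0, 150), (56, 150),
        (-85, 120), (-30, 120), (30, 120), (80, 120),
        (-56, 95), (0, 95), (56, 95),
        (-85, 70), (-30, 70), (30, 70), (80, 70),
        (-56, 45), (0, 45), (56, 45),
        (-85, 20), (-30, 20), (30, 20), (80, 20),
        (-56, 0), (-30, 0), (30, 0),
        (-85, -25), (-30, -25), (30, -25), (80, -25),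
        (-56, -60), (0, -60), (56, -60),
        (-85, -95), (-30, -95), (30, -95), (80, -95),
        (-56, -120), (0, -120), (-56, -120),
        (-85, -145), (-30, -145), (30, -145), (80, -145),
        (-56, -175), (0, -175), (56, -175),
        (-85, -185), (-30, -185), (30, -185), (80, -185)
    ]

-- ===== PORT A =====
-- for j in ob_list: … return True on first hit; return False   (early-return loop = List.any)
def is_position_blocked (x y : Int) : Bool :=
  obList.any (fun j =>
    let x_check := decide (x ≥ j.1) && decide (x ≤ j.1 + 4)
    let y_check := decide (y ≥ j.2) && decide (y ≤ j.2 + 4)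
    x_check && y_check)

def smaller_bigger (one two : Int) : Option (Int × Int) :=
  if one > two then some (two, one)
  else if two > one then some (one, two)
  else none  -- Python returns None when equal

def is_path_blocked (x1 : Int) (y1 : Int) (x2 : Int) (y2 : Int) : Bool :=
  let nums_x := smaller_bigger x1 x2
  let nums_y := smaller_bigger y1 y2
  if x1 ≠ x2 then
    match nums_x with
    | some (lo, hi) =>
        -- diff_list = list(range(lo, hi, 4)) + [hi]; final loop with early return = List.any
        let diff_list := PySem.List.pyRange lo hi 4 ++ [hi]
        diff_list.any (fun z => is_position_blocked z y1)
    | none => false   -- unreachable: x1 ≠ x2 makes smaller_bigger return a pair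
  else if y1 ≠ y2 then
    match nums_y with
    | some (lo, hi) =>
        let diff_list := PySem.List.pyRange lo hi 4 ++ [hi]
        diff_list.any (fun z => is_position_blocked x1 z)
    | none => false   -- unreachable likewise
  else false

-- ===== PORT B =====
def box_blocks (lo hi fixedC fa fb : Int) : Bool :=
  (decide (fa ≤ fixedC) && decide (fixedC ≤ fa + 4)) &&
    ((decide (fb ≤ hi) && decide (hi ≤ fb + 4)) ||
      decide (lo + 4 * max 0 (-(PySem.Int.floordiv (lo - fb) 4)) ≤ min (fb + 4) (hi - 1)))

def is_path_blocked_alt (x1 : Int) (y1 : Int) (x2 : Int) (y2 : Int) : Bool :=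
  if x1 ≠ x2 then
    let lo := if x1 < x2 then x1 else x2
    let hi := if x1 < x2 then x2 else x1
    obList.any (fun j => box_blocks lo hi y1 j.2 j.1)
  else if y1 ≠ y2 then
    let lo := if y1 < y2 then y1 else y2
    let hi := if y1 < y2 then y2 else y1
    obList.any (fun j => box_blocks lo hi x1 j.1 j.2)
  else false

-- ===== PRECONDITION & SPEC =====
def Spec_is_path_blocked (x1 : Int) (y1 : Int) (x2 : Int) (y2 : Int) (out : Bool) : Prop := out = is_path_blocked_alt x1 y1 x2 y2
instance (x1 : Int) (y1 : Int) (x2 : Int) (y2 : Int) (out : Bool) : Decidable (Spec_is_path_blocked x1 y1 x2 y2 out) := by unfold Spec_is_path_blocked; infer_instance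

-- ===== CLAIM (what is proved, stated in full; the proofs are below) =====
def Claim_equal_is_path_blocked : Prop := ∀ (x1 : Int) (y1 : Int) (x2 : Int) (y2 : Int), Dom_is_path_blocked x1 y1 x2 y2 → Spec_is_path_blocked x1 y1 x2 y2 (is_path_blocked x1 y1 x2 y2)

-- ===== LEMMAS AND PROOFS =====

-- Core: the sampled walk lo, lo+4, … (< hi) together with hi hits [a, a+4]
-- exactly when B's O(1) arithmetic test says so.
theorem key_hit (lo hi a : Int) (h : lo < hi) :
    (∃ z, (z ∈ PySem.List.pyRange lo hi 4 ∨ z = hi) ∧ a ≤ z ∧ z ≤ a + 4) ↔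
    ((a ≤ hi ∧ hi ≤ a + 4) ∨
      lo + 4 * max 0 (-(PySem.Int.floordiv (lo - a) 4)) ≤ min (a + 4) (hi - 1)) := by
  rw [PySem.Int.floordiv_eq_ediv_of_pos (by norm_num)]
  constructor
  · rintro ⟨z, hz | rfl, hz2⟩
    · rw [PySem.List.mem_pyRange_iff_of_pos (by norm_num)] at hz
      right; omega
    · left; exact hz2
  · rintro (h1 | h1)
    · exact ⟨hi, Or.inr rfl, h1⟩
    · refine ⟨lo + 4 * max 0 (-((lo - a) / 4)), Or.inl ?_, by omega, by omega⟩
      rw [PySem.List.mem_pyRange_iff_of_pos (by norm_num)]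
      omega

-- Per direction: A's scan over the sampled walk equals B's per-box scan.
theorem per_branch (lo hi c : Int) (h : lo < hi) (l : List (Int × Int))
    (mv fx : (Int × Int) → Int) :
    ((PySem.List.pyRange lo hi 4 ++ [hi]).any (fun z =>
        l.any (fun j =>
          (decide (mv j ≤ z) && decide (z ≤ mv j + 4)) &&
          (decide (fx j ≤ c) && decide (c ≤ fx j + 4))))) =
    l.any (fun j => box_blocks lo hi c (fx j) (mv j)) := by
  rw [Bool.eq_iff_iff]
  simp only [List.any_eq_true, List.mem_append, List.mem_singleton, box_blocks,
    Bool.and_eq_true, Bool.or_eq_true, decide_eq_true_eq]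
  constructor
  · rintro ⟨z, hz, j, hj, ⟨hza, hzb⟩, hc⟩
    exact ⟨j, hj, hc, ((key_hit lo hi (mv j) h).mp ⟨z, hz, hza, hzb⟩).imp id id⟩
  · rintro ⟨j, hj, hc, hrest⟩
    obtain ⟨z, hz, hza, hzb⟩ := (key_hit lo hi (mv j) h).mpr hrest
    exact ⟨z, hz, j, hj, ⟨hza, hzb⟩, hc⟩

-- ===== VERDICT (by name: the statement is the Claim_ definition above) =====
theorem is_path_blocked_spec : Claim_equal_is_path_blocked := by
  intro x1 y1 x2 y2 _
  unfold Spec_is_path_blocked is_path_blocked is_path_blocked_alt smaller_bigger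
  by_cases hx : x1 = x2
  · subst hx
    by_cases hy : y1 = y2
    · simp [hy]
    · rcases lt_or_gt_of_ne hy with hlt | hlt
      · simp only [if_neg (by omega : ¬ y1 > y2), if_pos (by omega : y2 > y1),
          ne_eq, not_true_eq_false, if_false, if_pos hy]
        rw [← per_branch y1 y2 x1 hlt obList Prod.snd Prod.fst]
        congr 1; funext z
        rw [Bool.eq_iff_iff]
        simp only [is_position_blocked, List.any_eq_true, Bool.and_eq_true, decide_eq_true_eq]
        constructor
        · rintro ⟨j, hj, ⟨h1, h2⟩, h3, h4⟩; exact ⟨j, hj, ⟨h3, h4⟩, h1, h2⟩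
        · rintro ⟨j, hj, ⟨h1, h2⟩, h3, h4⟩; exact ⟨j, hj, ⟨h3, h4⟩, h1, h2⟩
      · simp only [if_pos (by omega : y1 > y2),
          ne_eq, not_true_eq_false, if_false, if_pos hy, if_neg (by omega : ¬ y1 < y2)]
        rw [← per_branch y2 y1 x1 hlt obList Prod.snd Prod.fst]
        congr 1; funext z
        rw [Bool.eq_iff_iff]
        simp only [is_position_blocked, List.any_eq_true, Bool.and_eq_true, decide_eq_true_eq]
        constructor
        · rintro ⟨j, hj, ⟨h1, h2⟩, h3, h4⟩; exact ⟨j, hj, ⟨h3, h4⟩, h1, h2⟩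
        · rintro ⟨j, hj, ⟨h1, h2⟩, h3, h4⟩; exact ⟨j, hj, ⟨h3, h4⟩, h1, h2⟩
  · rcases lt_or_gt_of_ne hx with hlt | hlt
    · simp only [if_neg (by omega : ¬ x1 > x2), if_pos (by omega : x2 > x1),
        ne_eq, hx, not_false_eq_true, if_true]
      rw [← per_branch x1 x2 y1 hlt obList Prod.fst Prod.snd]
      rfl
    · simp only [if_pos (by omega : x1 > x2),
        ne_eq, hx, not_false_eq_true, if_true, if_neg (by omega : ¬ x1 < x2)]
      rw [← per_branch x2 x1 y1 hlt obList Prod.fst Prod.snd]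
      rfl
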